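-- pv_equiv track=rewrite | github.com/vgandhi1/FreeCodeCamp-daily_challenges | Oct_31_2025-spooky_case.py | spookify
-- ===== SOURCE A (Python) =====
-- def spookify(boo):
--     converted_boo = boo.replace("_","~").replace("-","~")
--     spooky_case = []
--     idx = 0
--     for char in converted_boo:
--         if char == "~":
--             #spooky_case.append(char)
--             spooky_case.append(char)
--
--             continue
--
--         if idx%2 == 0:
--             char = char.upper()
--         else:
--             char = char.lower()
--
--         spooky_case.append(char)
--         idx += 1
--
--
--
--     return "".join(spooky_case)
-- ===== SOURCE B (Python) =====
-- def spookify(boo):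
--     converted = boo.replace("_", "~").replace("-", "~")
--     letters = [c for c in converted if c != "~"]
--     cased = [c.upper() if i % 2 == 0 else c.lower() for i, c in enumerate(letters)]
--     it = iter(cased)
--     return "".join("~" if c == "~" else next(it) for c in converted)
-- ===== Notes on version B (the rewrite author's own statement) =====
-- stated objective: alternative
-- what changed: Replaces A's single stateful loop (running alternation index with a continue for separators) by two stateless passes: first case every non-'~' character by its filtered position via enumerate, then a second pass re-weaves the '~' separators back in.
import Mathlib
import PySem

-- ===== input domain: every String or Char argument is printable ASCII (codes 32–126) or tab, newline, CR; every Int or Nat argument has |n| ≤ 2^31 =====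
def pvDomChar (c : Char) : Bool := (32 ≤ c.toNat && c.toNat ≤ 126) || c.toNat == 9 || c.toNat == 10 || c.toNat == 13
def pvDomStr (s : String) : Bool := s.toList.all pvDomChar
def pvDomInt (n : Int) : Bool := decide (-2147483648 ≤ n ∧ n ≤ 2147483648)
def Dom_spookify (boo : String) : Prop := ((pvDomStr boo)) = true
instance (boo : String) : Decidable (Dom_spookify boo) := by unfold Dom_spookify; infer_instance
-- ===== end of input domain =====

-- B instead of A: two stateless passes (case letters by filtered position, then re-weave the '~' separators) replacing A's single loop with a running alternation index.

-- ===== PORT A =====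
def spookify (boo : String) : String :=
  let converted := PySem.Str.replace (PySem.Str.replace boo "_" "~") "-" "~"
  let st := converted.toList.foldl (fun (st : List Char × Int) ch =>
      if ch = '~' then (st.1 ++ [ch], st.2)
      else
        let c := if PySem.Int.mod st.2 2 == 0 then PySem.Chars.upperChar ch
                 else PySem.Chars.lowerChar ch
        (st.1 ++ [c], st.2 + 1)) (([] : List Char), (0 : Int))
  String.ofList st.1

-- ===== PORT B =====
-- the '"".join(... next(it) ...)' weaving pass of Source B, by hand (exact: the iterator
-- yields the cased characters in order; the [] fallback branch is unreachable in Source B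
-- because `cased` has exactly one element per non-'~' character)
def weaveB : List Char → List Char → List Char
  | [], _ => []
  | c :: rest, cs =>
    if c = '~' then '~' :: weaveB rest cs
    else match cs with
      | x :: cs' => x :: weaveB rest cs'
      | [] => []

def spookify_alt (boo : String) : String :=
  let converted := PySem.Str.replace (PySem.Str.replace boo "_" "~") "-" "~"
  let letters := converted.toList.filter (fun c => c ≠ '~')
  let cased := (PySem.List.enumerate letters).map
      (fun p => if PySem.Int.mod p.1 2 == 0 then PySem.Chars.upperChar p.2
                else PySem.Chars.lowerChar p.2)
  String.ofList (weaveB converted.toList cased)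

-- ===== PRECONDITION & SPEC =====
def Spec_spookify (boo : String) (out : String) : Prop := out = spookify_alt boo
instance (boo : String) (out : String) : Decidable (Spec_spookify boo out) := by unfold Spec_spookify; infer_instance

-- ===== CLAIM (what is proved, stated in full; the proofs are below) =====
def Claim_equal_spookify : Prop := ∀ (boo : String), Dom_spookify boo → Spec_spookify boo (spookify boo)

-- ===== LEMMAS AND PROOFS =====

-- the cased characters of a letter list, alternating starting at index n
def caseFrom (n : Int) : List Char → List Char
  | [] => []
  | c :: cs => (if PySem.Int.mod n 2 == 0 then PySem.Chars.upperChar c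
                else PySem.Chars.lowerChar c) :: caseFrom (n + 1) cs

lemma enumerate_map_eq_caseFrom (l : List Char) (n : Int) :
    (PySem.List.enumerate l n).map
      (fun p => if PySem.Int.mod p.1 2 == 0 then PySem.Chars.upperChar p.2
                else PySem.Chars.lowerChar p.2) = caseFrom n l := by
  induction l generalizing n with
  | nil => simp [caseFrom]
  | cons c cs ih =>
    rw [PySem.List.enumerate_cons]
    simp only [List.map_cons, caseFrom]
    rw [ih]

lemma foldl_eq_weave (l : List Char) (acc : List Char) (n : Int) :
    (l.foldl (fun (st : List Char × Int) ch =>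
      if ch = '~' then (st.1 ++ [ch], st.2)
      else
        let c := if PySem.Int.mod st.2 2 == 0 then PySem.Chars.upperChar ch
                 else PySem.Chars.lowerChar ch
        (st.1 ++ [c], st.2 + 1)) (acc, n)).1
    = acc ++ weaveB l (caseFrom n (l.filter (fun c => c ≠ '~'))) := by
  induction l generalizing acc n with
  | nil => simp [weaveB]
  | cons c cs ih =>
    by_cases hc : c = '~'
    · subst hc
      simp only [List.foldl_cons, List.filter_cons, weaveB]
      rw [ih]
      simp
    · simp only [List.foldl_cons, if_neg hc, List.filter_cons]
      rw [ih]
      simp [hc, caseFrom, weaveB]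

theorem spookify_eq (boo : String) : spookify boo = spookify_alt boo := by
  simp only [spookify, spookify_alt]
  rw [enumerate_map_eq_caseFrom, foldl_eq_weave]
  simp

-- ===== VERDICT (by name: the statement is the Claim_ definition above) =====
theorem spookify_spec : Claim_equal_spookify := by
  intro boo _
  exact spookify_eq boo
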